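-- pv_equiv track=rewrite | github.com/mcxu/code-sandbox | PythonSandbox/daily_coding_problem/dcp1276_same_sum_subset_partition.py | canPartitionSubsets
-- ===== SOURCE A (Python) =====
-- def canPartitionSubsets(l1, l2):
--     l1Sum = sum(l1)
--     l2Sum = sum(l2)
--
--     res = True
--     if l1Sum == l2Sum:
--         return res
--     else:
--         res = False
--
--     for i,_ in enumerate(l1):
--         popn = l1.pop(i)
--         l2.append(popn)
--
--         res |= canPartitionSubsets(l1, l2)
--
--         if res == True:
--             return True
--
--         l1.insert(i, popn)
--         l2.pop(-1)
--
--     return res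
-- ===== SOURCE B (Python) =====
-- def canPartitionSubsets(l1, l2):
--     sums = {0}
--     for x in l1:
--         sums |= {s + x for s in sums}
--     diff = sum(l1) - sum(l2)
--     if diff % 2 != 0:
--         return False
--     return diff // 2 in sums
-- ===== Notes on version B (the rewrite author's own statement) =====
-- stated objective: faster
-- what changed: Replaced the exponential recursive move-one-element-and-recurse search (with list mutation and backtracking) by a one-pass reachable-subset-sums set DP: build the set of all subset sums of l1, then test whether (sum(l1)-sum(l2))/2 is in it.
import Mathlib
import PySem

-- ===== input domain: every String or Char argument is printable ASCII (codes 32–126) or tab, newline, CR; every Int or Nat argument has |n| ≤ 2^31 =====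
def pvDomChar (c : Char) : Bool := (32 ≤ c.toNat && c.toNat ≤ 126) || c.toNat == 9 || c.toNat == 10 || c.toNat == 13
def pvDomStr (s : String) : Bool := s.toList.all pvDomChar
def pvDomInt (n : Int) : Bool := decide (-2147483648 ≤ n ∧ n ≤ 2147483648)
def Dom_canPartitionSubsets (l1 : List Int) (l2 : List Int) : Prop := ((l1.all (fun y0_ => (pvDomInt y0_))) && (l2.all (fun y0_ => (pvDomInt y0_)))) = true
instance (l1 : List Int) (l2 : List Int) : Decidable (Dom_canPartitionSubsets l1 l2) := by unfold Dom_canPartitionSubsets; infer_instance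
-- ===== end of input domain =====

-- B replaces A's exponential move-one-and-recurse backtracking search by a one-pass
-- reachable-subset-sums set DP (objective: faster). A mutates its arguments in place
-- (pop/insert/append; they are left mutated when it returns True early), B does not:
-- the equivalence proved here is about the RETURN value only.

-- ===== PORT A =====
-- A pops l1[i] onto l2, recurses, and restores both lists before the next iteration,
-- so the recursive call sees (l1 without index i, l2 ++ [l1[i]]).
mutual
def canPartitionSubsets (l1 : List Int) (l2 : List Int) : Bool :=
  if l1.sum = l2.sum then true
  else pvALoop l1 l2 0
termination_by (l1.length, l1.length + 1)

-- the `for i,_ in enumerate(l1)` loop with accumulator res and early `return True`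
def pvALoop (l1 : List Int) (l2 : List Int) (i : Nat) : Bool :=
  if h : i < l1.length then
    let popn := l1[i]
    if canPartitionSubsets (l1.eraseIdx i) (l2 ++ [popn]) then true
    else pvALoop l1 l2 (i + 1)
  else false
termination_by (l1.length, l1.length - i)
decreasing_by
  · left; simp [List.length_eraseIdx, h]; omega
  · right; omega
end

-- ===== PORT B =====
-- sums |= {s + x for s in sums}  (the set is consumed only via membership: order-independent)
def pvBStep (acc : PySem.Set Int) (x : Int) : PySem.Set Int :=
  PySem.Set.union acc (acc.map (fun s => s + x))

def canPartitionSubsets_alt (l1 : List Int) (l2 : List Int) : Bool :=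
  let sums := l1.foldl pvBStep (PySem.Set.ofList [0])
  let diff := l1.sum - l2.sum
  if PySem.Int.mod diff 2 ≠ 0 then false
  else PySem.Set.contains sums (PySem.Int.floordiv diff 2)

-- ===== PRECONDITION & SPEC =====
def Spec_canPartitionSubsets (l1 : List Int) (l2 : List Int) (out : Bool) : Prop := out = canPartitionSubsets_alt l1 l2
instance (l1 : List Int) (l2 : List Int) (out : Bool) : Decidable (Spec_canPartitionSubsets l1 l2 out) := by unfold Spec_canPartitionSubsets; infer_instance

-- ===== CLAIM (what is proved, stated in full; the proofs are below) =====
def Claim_equal_canPartitionSubsets : Prop := ∀ (l1 : List Int) (l2 : List Int), Dom_canPartitionSubsets l1 l2 → Spec_canPartitionSubsets l1 l2 (canPartitionSubsets l1 l2)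

-- ===== LEMMAS AND PROOFS =====

-- common characterisation: some sub-multiset S of l1 moved onto l2 equalises the sums
def pvMovable (l1 l2 : List Int) : Prop :=
  ∃ S : List Int, S.Subperm l1 ∧ l1.sum - S.sum = l2.sum + S.sum

theorem pv_sum_eraseIdx : ∀ (l : List Int) (j : Nat) (h : j < l.length),
    l.sum = l[j] + (l.eraseIdx j).sum := by
  intro l
  induction l with
  | nil => intro j h; simp at h
  | cons a t ih =>
      intro j h
      cases j with
      | zero => simp [List.eraseIdx]
      | succ k =>
          have hk : k < t.length := by simpa using h
          have := ih k hk
          simp only [List.eraseIdx, List.sum_cons, List.getElem_cons_succ, this]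
          ring

-- a cons sublist decomposes at its head element
theorem pv_cons_sublist_decomp : ∀ (l t : List Int) (a : Int), (a :: t).Sublist l →
    ∃ pre post, l = pre ++ a :: post ∧ t.Sublist post := by
  intro l
  induction l with
  | nil => intro t a h; exact absurd (List.eq_nil_of_sublist_nil h) (by simp)
  | cons b l' ih =>
      intro t a h
      cases h with
      | cons _ h' =>
          obtain ⟨pre, post, rfl, hs⟩ := ih t a h'
          exact ⟨b :: pre, post, rfl, hs⟩
      | cons₂ _ h' => exact ⟨[], l', rfl, h'⟩

theorem pv_eraseIdx_append : ∀ (pre post : List Int) (a : Int),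
    (pre ++ a :: post).eraseIdx pre.length = pre ++ post := by
  intro pre
  induction pre with
  | nil => intro post a; simp
  | cons b pre' ih => intro post a; simp [ih]

theorem pv_getElem_append (pre post : List Int) (a : Int)
    (h : pre.length < (pre ++ a :: post).length) :
    (pre ++ a :: post)[pre.length] = a := by
  rw [List.getElem_append_right (le_refl pre.length)]
  simp

-- l is a permutation of (l[j] :: l.eraseIdx j)
theorem pv_perm_cons_eraseIdx : ∀ (l : List Int) (j : Nat) (h : j < l.length),
    l.Perm (l[j] :: l.eraseIdx j) := by
  intro l
  induction l with
  | nil => intro j h; simp at h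
  | cons a t ih =>
      intro j h
      cases j with
      | zero => simp [List.eraseIdx]
      | succ k =>
          have hk : k < t.length := by simpa using h
          have h1 : (a :: t).Perm (a :: t[k] :: t.eraseIdx k) := List.Perm.cons a (ih k hk)
          have h2 : (a :: t[k] :: t.eraseIdx k).Perm (t[k] :: a :: t.eraseIdx k) :=
            List.Perm.swap _ _ _
          simpa using h1.trans h2

-- the loop returns true iff some index ≥ i succeeds
theorem pvALoop_iff (l1 l2 : List Int) (i : Nat) :
    pvALoop l1 l2 i = true ↔
      ∃ j, i ≤ j ∧ ∃ h : j < l1.length,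
        canPartitionSubsets (l1.eraseIdx j) (l2 ++ [l1[j]]) = true := by
  generalize hfuel : l1.length - i = n
  induction n generalizing i with
  | zero =>
      rw [pvALoop]
      have hni : ¬ i < l1.length := by omega
      simp only [hni, dite_false]
      constructor
      · intro h; simp at h
      · rintro ⟨j, hij, hj, -⟩; omega
  | succ n ih =>
      have hi : i < l1.length := by omega
      rw [pvALoop]
      simp only [hi, dite_true]
      by_cases hrec : canPartitionSubsets (l1.eraseIdx i) (l2 ++ [l1[i]]) = true
      · simp only [hrec, if_true, true_iff]
        exact ⟨i, le_refl _, hi, hrec⟩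
      · simp only [Bool.not_eq_true] at hrec
        simp only [hrec, Bool.false_eq_true, if_false]
        rw [ih (i + 1) (by omega)]
        constructor
        · rintro ⟨j, hij, hj, hc⟩; exact ⟨j, by omega, hj, hc⟩
        · rintro ⟨j, hij, hj, hc⟩
          refine ⟨j, ?_, hj, hc⟩
          rcases Nat.lt_or_ge i j with h' | h'
          · omega
          · have hji : j = i := by omega
            subst hji
            rw [hc] at hrec
            exact absurd hrec (by simp)

theorem pv_A_iff (l1 l2 : List Int) :
    canPartitionSubsets l1 l2 = true ↔ pvMovable l1 l2 := by
  rw [canPartitionSubsets]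
  by_cases heq : l1.sum = l2.sum
  · simp only [heq, if_true, true_iff]
    exact ⟨[], List.nil_subperm, by simp [heq]⟩
  · simp only [heq, if_false]
    rw [pvALoop_iff]
    constructor
    · rintro ⟨j, -, hj, hc⟩
      obtain ⟨S, hS, hsum⟩ := (pv_A_iff (l1.eraseIdx j) (l2 ++ [l1[j]])).mp hc
      refine ⟨l1[j] :: S, ?_, ?_⟩
      · exact ((List.subperm_cons l1[j]).mpr hS).trans
          (pv_perm_cons_eraseIdx l1 j hj).symm.subperm
      · have h1 := pv_sum_eraseIdx l1 j hj
        simp only [List.sum_append, List.sum_cons, List.sum_nil] at hsum ⊢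
        omega
    · rintro ⟨S, hS, hsum⟩
      obtain ⟨t, htS, hsub⟩ := hS
      have htsum : t.sum = S.sum := htS.sum_eq
      cases t with
      | nil =>
          exfalso
          have : S.sum = 0 := by rw [← htsum]; simp
          omega
      | cons s t' =>
          obtain ⟨pre, post, hl, ht'⟩ := pv_cons_sublist_decomp _ t' s hsub
          have hj : pre.length < l1.length := by
            rw [hl]; simp only [List.length_append, List.length_cons]; omega
          refine ⟨pre.length, Nat.zero_le _, hj, ?_⟩
          simp only [hl]
          rw [pv_eraseIdx_append, pv_getElem_append _ _ _ (by
            simp only [List.length_append, List.length_cons]; omega)]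
          rw [pv_A_iff (pre ++ post) (l2 ++ [s])]
          refine ⟨t', (ht'.trans (List.sublist_append_right pre post)).subperm, ?_⟩
          rw [hl] at hsum
          simp only [List.sum_append, List.sum_cons, List.sum_nil] at hsum htsum ⊢
          omega
termination_by l1.length
decreasing_by
  · simp [List.length_eraseIdx, hj]; omega
  · rw [hl]; simp only [List.length_append, List.length_cons]; omega

-- B-side: membership in the folded set = a base element plus a sublist sum
theorem pv_B_mem : ∀ (xs : List Int) (acc : PySem.Set Int) (y : Int),
    (y ∈ xs.foldl pvBStep acc ↔ ∃ a ∈ acc, ∃ S : List Int, S.Sublist xs ∧ y = a + S.sum) := by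
  intro xs
  induction xs with
  | nil =>
      intro acc y
      simp only [List.foldl_nil]
      constructor
      · intro h; exact ⟨y, h, [], List.nil_sublist _, by simp⟩
      · rintro ⟨a, ha, S, hS, rfl⟩
        have : S = [] := List.eq_nil_of_sublist_nil hS
        subst this; simpa using ha
  | cons x xs ih =>
      intro acc y
      simp only [List.foldl_cons]
      rw [ih]
      constructor
      · rintro ⟨a, ha, S, hS, rfl⟩
        rcases (PySem.Set.mem_union _ _ _).mp ha with ha' | ha'
        · exact ⟨a, ha', S, List.Sublist.cons x hS, rfl⟩
        · obtain ⟨b, hb, rfl⟩ := List.mem_map.mp ha'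
          exact ⟨b, hb, x :: S, List.Sublist.cons₂ x hS, by simp; ring⟩
      · rintro ⟨a, ha, S, hS, rfl⟩
        rcases List.sublist_cons_iff.mp hS with hS' | ⟨r, rfl, hr⟩
        · exact ⟨a, (PySem.Set.mem_union _ _ _).mpr (Or.inl ha), S, hS', rfl⟩
        · refine ⟨a + x, (PySem.Set.mem_union _ _ _).mpr (Or.inr (List.mem_map.mpr ⟨a, ha, rfl⟩)),
            r, hr, by simp; ring⟩

theorem pv_B_iff (l1 l2 : List Int) :
    canPartitionSubsets_alt l1 l2 = true ↔ pvMovable l1 l2 := by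
  unfold canPartitionSubsets_alt
  by_cases hm : PySem.Int.mod (l1.sum - l2.sum) 2 = 0
  · rw [if_neg (fun h => h hm)]
    have hmod : (l1.sum - l2.sum) % 2 = 0 := by
      rw [PySem.Int.mod_eq_emod_of_pos (by norm_num : (0:Int) < 2)] at hm
      exact hm
    have hfd : PySem.Int.floordiv (l1.sum - l2.sum) 2 = (l1.sum - l2.sum) / 2 :=
      PySem.Int.floordiv_eq_ediv_of_pos (by norm_num)
    rw [PySem.Set.contains_iff, pv_B_mem, hfd]
    constructor
    · rintro ⟨a, ha, S, hS, hy⟩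
      have ha0 : a = 0 := by simpa [PySem.Set.ofList] using ha
      subst ha0
      exact ⟨S, hS.subperm, by omega⟩
    · rintro ⟨S, hS, hsum⟩
      obtain ⟨t, htS, hsub⟩ := hS
      have htsum : t.sum = S.sum := htS.sum_eq
      exact ⟨0, by simp [PySem.Set.ofList], t, hsub, by omega⟩
  · rw [if_pos hm]
    constructor
    · intro h; simp at h
    · rintro ⟨S, hS, hsum⟩
      exfalso
      apply hm
      rw [PySem.Int.mod_eq_emod_of_pos (by norm_num : (0:Int) < 2)]
      omega

-- ===== VERDICT (by name: the statement is the Claim_ definition above) =====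
theorem canPartitionSubsets_spec : Claim_equal_canPartitionSubsets := by
  intro l1 l2 _
  unfold Spec_canPartitionSubsets
  have hA := pv_A_iff l1 l2
  have hB := pv_B_iff l1 l2
  cases hA' : canPartitionSubsets l1 l2 <;> cases hB' : canPartitionSubsets_alt l1 l2 <;>
    simp_all
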